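-- pv_equiv track=rewrite | github.com/arunatma/PythonUtilities | Puzzles/twinPrimes.py | get_nth_twin_prime_mean
-- ===== SOURCE A (Python) =====
-- def factorial (n):
--     if n == 0 or n == 1:
--         return 1
--     else:
--         return n * factorial(n - 1)
--
-- def get_nth_twin_prime_mean(n):
--     # Works till the value of 1000000
--     count = 0
--     for m in range(2, 1000000):
--         divisor = m * (m + 2)
--         lhs = (4 * (factorial (m - 1) + 1)) % divisor
--         rhs = -m % divisor
--         if lhs == rhs:
--             count += 1
--         if count == n:
--             return (m + 1)
-- ===== SOURCE B (Python) =====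
-- def _is_prime(k):
--     if k < 2:
--         return False
--     i = 2
--     while i * i <= k:
--         if k % i == 0:
--             return False
--         i += 1
--     return True
--
-- def get_nth_twin_prime_mean(n):
--     count = 0
--     for p in range(2, 1000000):
--         if _is_prime(p) and _is_prime(p + 2):
--             count += 1
--             if count == n:
--                 return p + 1
-- ===== Notes on version B (the rewrite author's own statement) =====
-- stated objective: faster
-- what changed: A tests each candidate m with Clement's congruence 4((m-1)!+1) == -m mod m(m+2), computing a huge factorial per candidate; B tests m and m+2 for primality directly by trial division up to sqrt, so no factorials at all.
-- outside the precondition, e.g. on get_nth_twin_prime_mean(0): A returns 3, B returns None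
import Mathlib
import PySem

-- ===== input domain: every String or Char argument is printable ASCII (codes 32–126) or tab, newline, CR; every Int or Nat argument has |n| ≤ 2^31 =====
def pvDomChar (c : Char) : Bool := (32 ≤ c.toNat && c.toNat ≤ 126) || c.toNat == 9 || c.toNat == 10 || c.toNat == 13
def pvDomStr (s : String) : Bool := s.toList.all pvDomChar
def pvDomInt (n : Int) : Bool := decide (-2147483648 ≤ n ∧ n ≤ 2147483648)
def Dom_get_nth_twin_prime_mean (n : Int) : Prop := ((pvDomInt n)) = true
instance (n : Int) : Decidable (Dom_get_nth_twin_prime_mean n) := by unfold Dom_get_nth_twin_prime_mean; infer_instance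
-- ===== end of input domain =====

-- B replaces A's per-candidate Clement/Wilson factorial congruence test with direct
-- trial-division primality of m and m+2 (objective: faster; no big factorials).

-- ===== PORT A =====
-- A's recursive factorial; fuel only makes the recursion total (callers below always supply enough).
def pvFactA (fuel : Nat) (n : Int) : Int :=
  match fuel with
  | 0 => 1
  | f + 1 => if n = 0 ∨ n = 1 then 1 else n * pvFactA f (n - 1)

-- A's for-loop with early return (none = Python falls off the loop and returns None).
def pvLoopA (n : Int) : List Int → Int → Option Int
  | [], _ => none
  | m :: ms, count =>
    let divisor := m * (m + 2)
    let lhs := PySem.Int.mod (4 * (pvFactA (m - 1).toNat (m - 1) + 1)) divisor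
    let rhs := PySem.Int.mod (-m) divisor
    let count' := if lhs = rhs then count + 1 else count
    if count' = n then some (m + 1) else pvLoopA n ms count'

def get_nth_twin_prime_mean (n : Int) : Int :=
  (pvLoopA n (PySem.List.pyRange 2 1000000 1) 0).getD 0

-- ===== PORT B =====
-- B's while loop `while i*i <= k`; fuel k.toNat is always enough since the loop stops before i exceeds sqrt k + 1.
def pvTrialB (fuel : Nat) (k i : Int) : Bool :=
  match fuel with
  | 0 => true
  | f + 1 =>
    if i * i ≤ k then (if PySem.Int.mod k i = 0 then false else pvTrialB f k (i + 1))
    else true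

def pvIsPrimeB (k : Int) : Bool :=
  if k < 2 then false else pvTrialB k.toNat k 2

def pvLoopB (n : Int) : List Int → Int → Option Int
  | [], _ => none
  | p :: ps, count =>
    if pvIsPrimeB p && pvIsPrimeB (p + 2) then
      (if count + 1 = n then some (p + 1) else pvLoopB n ps (count + 1))
    else pvLoopB n ps count

def get_nth_twin_prime_mean_alt (n : Int) : Int :=
  (pvLoopB n (PySem.List.pyRange 2 1000000 1) 0).getD 0

-- ===== PRECONDITION & SPEC =====
-- Pre_ excludes the inputs on which Python A returns no int: for n > 8169 (the number of
-- twin-prime pairs (m, m+2) with 2 ≤ m < 10^6) and for n < 0 the loop ends and A returns None;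
-- n = 0 is also excluded: there A returns 3 before testing anything (count == n holds on entry
-- at m = 2), an accident of checking `count == n` outside the hit branch, and B returns None.
def Pre_get_nth_twin_prime_mean (n : Int) : Prop := 1 ≤ n ∧ n ≤ 8169
instance (n : Int) : Decidable (Pre_get_nth_twin_prime_mean n) := by
  unfold Pre_get_nth_twin_prime_mean; infer_instance

def pvWitness_get_nth_twin_prime_mean : Int := 3

def Spec_get_nth_twin_prime_mean (n : Int) (out : Int) : Prop := out = get_nth_twin_prime_mean_alt n
instance (n : Int) (out : Int) : Decidable (Spec_get_nth_twin_prime_mean n out) := by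
  unfold Spec_get_nth_twin_prime_mean; infer_instance

-- ===== CLAIM (what is proved, stated in full; the proofs are below) =====
def Claim_equal_get_nth_twin_prime_mean : Prop :=
  ∀ (n : Int), Dom_get_nth_twin_prime_mean n → Pre_get_nth_twin_prime_mean n →
    Spec_get_nth_twin_prime_mean n (get_nth_twin_prime_mean n)

-- ===== LEMMAS AND PROOFS =====

-- A's factorial computes the mathematical factorial (with enough fuel).
theorem pvFactA_eq (f k : Nat) (hk : k ≤ f + 1) :
    pvFactA f (k : Int) = (Nat.factorial k : Int) := by
  induction f generalizing k with
  | zero =>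
    interval_cases k <;> simp [pvFactA, Nat.factorial]
  | succ f ih =>
    rcases Nat.lt_or_ge k 2 with h | h
    · interval_cases k <;> simp [pvFactA, Nat.factorial]
    · have h0 : ¬((k : Int) = 0 ∨ (k : Int) = 1) := by omega
      have hk1 : (k : Int) - 1 = ((k - 1 : Nat) : Int) := by omega
      rw [pvFactA, if_neg h0, hk1, ih (k - 1) (by omega)]
      have : k = (k - 1) + 1 := by omega
      rw [this, Nat.factorial_succ]
      push_cast
      ring

-- B's trial loop returns true iff no divisor ≥ i with square ≤ k (with enough fuel).
theorem pvTrialB_iff (f : Nat) (k i : Int) (hi : 1 ≤ i) (hf : k < (i + f) * (i + f)) :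
    pvTrialB f k i = true ↔ ∀ j : Int, i ≤ j → j * j ≤ k → ¬ j ∣ k := by
  induction f generalizing i with
  | zero =>
    push_cast at hf
    constructor
    · intro _ j hj hjk
      exfalso
      nlinarith
    · intro _
      rfl
  | succ f ih =>
    rw [pvTrialB]
    by_cases hle : i * i ≤ k
    · rw [if_pos hle]
      by_cases hd : PySem.Int.mod k i = 0
      · rw [if_pos hd]
        constructor
        · intro h
          exact absurd h (by simp)
        · intro h
          exact absurd ((PySem.Int.mod_eq_zero_iff_dvd k i).mp hd) (h i le_rfl hle)
      · rw [if_neg hd]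
        have hnd : ¬ i ∣ k := fun h => hd ((PySem.Int.mod_eq_zero_iff_dvd k i).mpr h)
        rw [ih (i + 1) (by omega) (by push_cast at hf ⊢; nlinarith [hf])]
        constructor
        · intro h j hj hjk
          rcases eq_or_lt_of_le hj with rfl | hlt
          · exact hnd
          · exact h j (by omega) hjk
        · intro h j hj hjk
          exact h j (by omega) hjk
    · rw [if_neg hle]
      simp only [true_iff]
      intro j hj hjk
      exfalso
      have : i * i ≤ j * j := by nlinarith
      omega

-- B's primality test is correct.
theorem pvIsPrimeB_iff (K : Nat) : pvIsPrimeB (K : Int) = true ↔ Nat.Prime K := by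
  rcases Nat.lt_or_ge K 2 with h | h
  · rw [pvIsPrimeB, if_pos (by exact_mod_cast h)]
    simp
    intro hp
    exact absurd hp.two_le (by omega)
  · rw [pvIsPrimeB, if_neg (by omega)]
    rw [Int.toNat_natCast]
    rw [pvTrialB_iff K (K : Int) 2 (by norm_num) (by nlinarith [show (2:Int) ≤ (K:Int) from by exact_mod_cast h])]
    rw [Nat.prime_def_le_sqrt]
    constructor
    · intro hdiv
      refine ⟨h, fun d hd2 hds hdd => ?_⟩
      have hdd' : (d : Int) * d ≤ (K : Int) := by exact_mod_cast Nat.le_sqrt.mp hds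
      exact hdiv (d : Int) (by exact_mod_cast hd2) hdd' (Int.natCast_dvd_natCast.mpr hdd)
    · rintro ⟨-, hp⟩ j hj2 hjk hjd
      have hj0 : 0 ≤ j := by omega
      lift j to Nat using hj0 with d
      refine hp d (by exact_mod_cast hj2) (Nat.le_sqrt.mpr (by exact_mod_cast hjk))
        (Int.natCast_dvd_natCast.mp hjd)

-- Clement's theorem.
theorem clement (m : Nat) (hm : 2 ≤ m) :
    (m * (m + 2)) ∣ (4 * (Nat.factorial (m - 1) + 1) + m) ↔
      (Nat.Prime m ∧ Nat.Prime (m + 2)) := by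
  rcases Nat.even_or_odd m with he | ho
  · -- even m: both sides are false
    constructor
    · intro hdvd
      exfalso
      by_cases h2 : m = 2
      · subst h2; revert hdvd; decide
      by_cases h4 : m = 4
      · subst h4; revert hdvd; decide
      obtain ⟨k, hk⟩ := he
      have hk3 : 3 ≤ k := by omega
      have hmX : m ∣ 4 * (Nat.factorial (m - 1) + 1) + m :=
        (dvd_mul_right m (m + 2)).trans hdvd
      have h1 : m ∣ 4 * (Nat.factorial (m - 1) + 1) := Nat.dvd_add_self_right.mp hmX
      have h1' : 2 * k ∣ 2 * (2 * (Nat.factorial (m - 1) + 1)) := by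
        have hm2k : m = 2 * k := by omega
        have he4 : 2 * (2 * (Nat.factorial (m - 1) + 1)) = 4 * (Nat.factorial (m - 1) + 1) := by
          ring
        rw [← hm2k, he4]
        exact h1
      have h2k : k ∣ 2 * (Nat.factorial (m - 1) + 1) :=
        (mul_dvd_mul_iff_left (two_ne_zero)).mp h1'
      have hkF : k ∣ Nat.factorial (m - 1) := Nat.dvd_factorial (by omega) (by omega)
      have hk2 : k ∣ 2 := by
        have hsub := Nat.dvd_sub h2k (hkF.mul_left 2)
        have he2 : 2 * (Nat.factorial (m - 1) + 1) - 2 * Nat.factorial (m - 1) = 2 := by omega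
        rwa [he2] at hsub
      have := Nat.le_of_dvd (by norm_num) hk2
      omega
    · rintro ⟨hp, hq⟩
      have h2 : m = 2 := (Nat.Prime.even_iff hp).mp he
      subst h2
      exact absurd hq (by decide)
  · -- odd m
    have h3 : 3 ≤ m := by rcases ho with ⟨t, ht⟩; omega
    have hco2 : Nat.Coprime m 2 := Nat.coprime_two_right.mpr ho
    have hco : Nat.Coprime m (m + 2) := by
      rw [add_comm]
      exact Nat.coprime_add_self_right.mpr hco2
    have hoq : Odd (m + 2) := ho.add_even even_two
    have hcoq2 : Nat.Coprime (m + 2) 2 := Nat.coprime_two_right.mpr hoq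
    have hsplit : m * (m + 2) ∣ 4 * (Nat.factorial (m - 1) + 1) + m ↔
        (m ∣ 4 * (Nat.factorial (m - 1) + 1) + m ∧
         (m + 2) ∣ 4 * (Nat.factorial (m - 1) + 1) + m) :=
      ⟨fun h => ⟨(dvd_mul_right m (m + 2)).trans h, (dvd_mul_left (m + 2) m).trans h⟩,
       fun ⟨h1, h2⟩ => hco.mul_dvd_of_dvd_of_dvd h1 h2⟩
    have hm_iff : m ∣ 4 * (Nat.factorial (m - 1) + 1) + m ↔ Nat.Prime m := by
      rw [Nat.dvd_add_self_right]
      have hco4 : Nat.Coprime m 4 := by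
        have := hco2.mul_right hco2
        norm_num at this
        exact this
      rw [hco4.dvd_mul_left]
      rw [← ZMod.natCast_eq_zero_iff (Nat.factorial (m - 1) + 1) m]
      rw [Nat.prime_iff_fac_equiv_neg_one (show m ≠ 1 by omega)]
      push_cast
      constructor
      · intro h
        linear_combination h
      · intro h
        linear_combination h
    have hq_iff : (m + 2) ∣ 4 * (Nat.factorial (m - 1) + 1) + m ↔ Nat.Prime (m + 2) := by
      haveI : NeZero (m + 2) := ⟨by omega⟩
      have hm2 : ((m : ZMod (m + 2))) = -2 := by
        have h0 : ((m + 2 : ℕ) : ZMod (m + 2)) = 0 := ZMod.natCast_self _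
        push_cast at h0
        linear_combination h0
      have hfact : Nat.factorial (m + 1) = (m + 1) * (m * Nat.factorial (m - 1)) := by
        rw [Nat.factorial_succ, ← Nat.mul_factorial_pred (show m ≠ 0 by omega)]
      have hcast : ((4 * (Nat.factorial (m - 1) + 1) + m : ℕ) : ZMod (m + 2)) =
          ((2 * (Nat.factorial (m + 1) + 1) : ℕ) : ZMod (m + 2)) := by
        rw [hfact]
        push_cast [hm2]
        ring
      rw [← ZMod.natCast_eq_zero_iff, hcast, ZMod.natCast_eq_zero_iff]
      rw [hcoq2.dvd_mul_left]
      rw [← ZMod.natCast_eq_zero_iff]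
      rw [Nat.prime_iff_fac_equiv_neg_one (show m + 2 ≠ 1 by omega)]
      have : m + 2 - 1 = m + 1 := by omega
      rw [this]
      push_cast
      constructor
      · intro h; linear_combination h
      · intro h; linear_combination h
    rw [hsplit, hm_iff, hq_iff]

-- The two per-candidate tests agree.
theorem cond_eq (m : Int) (hm : 2 ≤ m) :
    (PySem.Int.mod (4 * (pvFactA (m - 1).toNat (m - 1) + 1)) (m * (m + 2)) =
       PySem.Int.mod (-m) (m * (m + 2))) ↔
      (pvIsPrimeB m && pvIsPrimeB (m + 2)) = true := by
  have hm0 : 0 ≤ m := by omega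
  lift m to Nat using hm0 with M
  have hM : 2 ≤ M := by exact_mod_cast hm
  have hD : (0 : Int) < (M : Int) * ((M : Int) + 2) := by positivity
  have htn : ((M : Int) - 1).toNat = M - 1 := by omega
  have hfc : (M : Int) - 1 = ((M - 1 : Nat) : Int) := by omega
  have hfa : pvFactA ((M : Int) - 1).toNat ((M : Int) - 1) = (Nat.factorial (M - 1) : Int) := by
    rw [htn, hfc]
    exact pvFactA_eq (M - 1) (M - 1) (by omega)
  rw [hfa]
  rw [PySem.Int.mod_eq_emod_of_pos hD, PySem.Int.mod_eq_emod_of_pos hD]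
  have hmodeq : ((4 * ((Nat.factorial (M - 1) : Int) + 1)) % ((M : Int) * ((M : Int) + 2)) =
      (-(M : Int)) % ((M : Int) * ((M : Int) + 2))) ↔
      ((M : Int) * ((M : Int) + 2)) ∣ (4 * ((Nat.factorial (M - 1) : Int) + 1) + (M : Int)) := by
    rw [show (4 * ((Nat.factorial (M - 1) : Int) + 1) + (M : Int)) =
        -((-(M : Int)) - 4 * ((Nat.factorial (M - 1) : Int) + 1)) by ring, dvd_neg]
    exact Int.modEq_iff_dvd
  rw [hmodeq]
  have hcast : (4 * ((Nat.factorial (M - 1) : Int) + 1) + (M : Int)) =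
      ((4 * (Nat.factorial (M - 1) + 1) + M : Nat) : Int) := by push_cast; ring
  have hcast2 : ((M : Int) * ((M : Int) + 2)) = ((M * (M + 2) : Nat) : Int) := by push_cast; ring
  rw [hcast, hcast2, Int.natCast_dvd_natCast, clement M hM]
  rw [Bool.and_eq_true]
  rw [show ((M : Int) + 2) = ((M + 2 : Nat) : Int) by push_cast; ring]
  rw [pvIsPrimeB_iff M, pvIsPrimeB_iff (M + 2)]

-- Loop agreement while count is still below n.
theorem loop_eq (n : Int) (ms : List Int) (hms : ∀ m ∈ ms, 2 ≤ m) :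
    ∀ count : Int, count < n → pvLoopA n ms count = pvLoopB n ms count := by
  induction ms with
  | nil => intro count _; rfl
  | cons m ms ih =>
    intro count hcount
    have hm : 2 ≤ m := hms m (List.mem_cons_self ..)
    have hms' : ∀ x ∈ ms, 2 ≤ x := fun x hx => hms x (List.mem_cons_of_mem _ hx)
    rw [pvLoopA, pvLoopB]
    by_cases hc : PySem.Int.mod (4 * (pvFactA (m - 1).toNat (m - 1) + 1)) (m * (m + 2)) =
        PySem.Int.mod (-m) (m * (m + 2))
    · have hb : (pvIsPrimeB m && pvIsPrimeB (m + 2)) = true := (cond_eq m hm).mp hc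
      simp only [hc, if_pos, hb]
      by_cases hn : count + 1 = n
      · simp [hn]
      · simp only [if_neg hn]
        exact ih hms' (count + 1) (by omega)
    · have hb : ¬ (pvIsPrimeB m && pvIsPrimeB (m + 2)) = true := fun h => hc ((cond_eq m hm).mpr h)
      simp only [if_neg hc, if_neg hb]
      have hne : ¬ count = n := by omega
      simp only [if_neg hne]
      exact ih hms' count hcount

theorem range_ge_two : ∀ m ∈ PySem.List.pyRange 2 1000000 1, (2 : Int) ≤ m := by
  intro m hm
  have := (PySem.List.mem_pyRange_one (a := 2) (b := 1000000) (x := m)).mp hm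
  omega

-- ===== VERDICT (by name: the statement is the Claim_ definition above) =====
theorem get_nth_twin_prime_mean_spec : Claim_equal_get_nth_twin_prime_mean := by
  intro n _ hpre
  unfold Spec_get_nth_twin_prime_mean get_nth_twin_prime_mean get_nth_twin_prime_mean_alt
  rw [loop_eq n _ range_ge_two 0 (by exact hpre.1)]
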